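-- pv_equiv track=rewrite | github.com/Amallmmd/ChatBot | WebApp/logic.py | check_laden_ballast_change
-- ===== SOURCE A (Python) =====
-- def check_laden_ballast_change(vessel_history, new_laden_ballast, new_report_type):
--     # Only allow Laden/Ballast change after 'Arrival At Berth'
--     if len(vessel_history) < 1:
--         return True, None
--     prev_status = vessel_history[-1]['Laden_Ballst']
--     prev_report = vessel_history[-1]['Report_Type']
--     if prev_status != new_laden_ballast:
--         # Only allow change if previous report was 'Arrival At Berth' or later
--         allowed = False
--         for row in reversed(vessel_history):
--             if row['Report_Type'] == 'Arrival At Berth':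
--                 allowed = True
--                 break
--             if row['Report_Type'] in ['Departure From Berth', 'Departure']:
--                 break
--         if not allowed:
--             return False, "Laden/Ballast status can only change after 'Arrival At Berth'."
--     return True, None
-- ===== SOURCE B (Python) =====
-- def check_laden_ballast_change(vessel_history, new_laden_ballast, new_report_type):
--     # Single forward pass recording last arrival/departure indices, instead of A's backward early-exit loop.
--     if len(vessel_history) < 1:
--         return True, None
--     if vessel_history[-1]['Laden_Ballst'] == new_laden_ballast:
--         return True, None
--     last_arrival = None
--     last_departure = None
--     for i, row in enumerate(vessel_history):
--         rt = row.get('Report_Type', '')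
--         if rt == 'Arrival At Berth':
--             last_arrival = i
--         elif rt in ('Departure From Berth', 'Departure'):
--             last_departure = i
--     allowed = last_arrival is not None and (last_departure is None or last_arrival > last_departure)
--     if allowed:
--         return True, None
--     return False, "Laden/Ballast status can only change after 'Arrival At Berth'."
-- ===== Notes on version B (the rewrite author's own statement) =====
-- stated objective: alternative
-- what changed: Replaces A's backward early-exit loop over reversed(vessel_history) by a single forward pass that records the last 'Arrival At Berth' and last departure indices and compares them.
import Mathlib
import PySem

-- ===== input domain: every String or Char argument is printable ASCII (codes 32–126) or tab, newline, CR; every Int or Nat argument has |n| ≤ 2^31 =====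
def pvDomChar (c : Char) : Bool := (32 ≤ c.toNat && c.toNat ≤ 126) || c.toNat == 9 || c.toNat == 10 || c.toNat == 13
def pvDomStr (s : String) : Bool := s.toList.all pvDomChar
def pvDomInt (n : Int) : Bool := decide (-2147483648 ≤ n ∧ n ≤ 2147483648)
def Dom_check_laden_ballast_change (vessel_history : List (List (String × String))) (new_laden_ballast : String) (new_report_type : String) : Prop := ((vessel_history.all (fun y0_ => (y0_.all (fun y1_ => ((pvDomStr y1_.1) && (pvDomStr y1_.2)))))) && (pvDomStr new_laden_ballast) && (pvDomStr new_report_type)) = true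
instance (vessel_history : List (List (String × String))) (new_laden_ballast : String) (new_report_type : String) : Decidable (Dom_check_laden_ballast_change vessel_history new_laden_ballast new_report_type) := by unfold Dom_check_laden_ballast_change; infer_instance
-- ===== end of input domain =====

-- ===== PORT A =====
-- B replaces A's backward early-exit scan with a forward last-index scan; equivalence of return values only.
-- dict key lookup (first match in the association list; the "" default is only reached where Python A
-- raises KeyError, i.e. outside Pre_; B's .get(...,'') lookup uses the same default deliberately)
def pvGetS (row : List (String × String)) (k : String) : String :=
  (row.lookup k).getD ""

-- the 'for row in reversed(vessel_history)' loop of A, applied to the already-reversed list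
def pvALoop : List (List (String × String)) → Bool
  | [] => false
  | row :: rest =>
    if pvGetS row "Report_Type" = "Arrival At Berth" then true
    else if pvGetS row "Report_Type" = "Departure From Berth" ∨ pvGetS row "Report_Type" = "Departure" then false
    else pvALoop rest

def check_laden_ballast_change (vessel_history : List (List (String × String))) (new_laden_ballast : String) (new_report_type : String) : Bool × Option String :=
  if vessel_history.length < 1 then (true, none)
  else
    let last := (PySem.List.pyGet? vessel_history (-1)).getD []
    let prev_status := pvGetS last "Laden_Ballst"
    let _prev_report := pvGetS last "Report_Type"
    if prev_status ≠ new_laden_ballast then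
      let allowed := pvALoop vessel_history.reverse
      if !allowed then (false, some "Laden/Ballast status can only change after 'Arrival At Berth'.")
      else (true, none)
    else (true, none)

-- ===== PORT B =====
-- state: (next index, last_arrival, last_departure); rt := row.get('Report_Type', '')
def pvBStep (st : Int × Option Int × Option Int) (row : List (String × String)) : Int × Option Int × Option Int :=
  let rt := pvGetS row "Report_Type"
  if rt = "Arrival At Berth" then (st.1 + 1, some st.1, st.2.2)
  else if rt = "Departure From Berth" ∨ rt = "Departure" then (st.1 + 1, st.2.1, some st.1)
  else (st.1 + 1, st.2.1, st.2.2)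

def pvBAllowed : Option Int → Option Int → Bool
  | none, _ => false
  | some _, none => true
  | some a, some d => decide (a > d)

def check_laden_ballast_change_alt (vessel_history : List (List (String × String))) (new_laden_ballast : String) (new_report_type : String) : Bool × Option String :=
  if vessel_history.length < 1 then (true, none)
  else
    let last := (PySem.List.pyGet? vessel_history (-1)).getD []
    if pvGetS last "Laden_Ballst" = new_laden_ballast then (true, none)
    else
      let st := vessel_history.foldl pvBStep (0, none, none)
      if pvBAllowed st.2.1 st.2.2 then (true, none)
      else (false, some "Laden/Ballast status can only change after 'Arrival At Berth'.")

-- ===== PRECONDITION & SPEC =====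
-- Pre_ excludes exactly the inputs on which Python A raises KeyError: a last row missing
-- 'Laden_Ballst'/'Report_Type', or — when the status changes — a row missing 'Report_Type' that A's
-- backward loop reaches (no later row carries an arrival/departure Report_Type to stop the loop first).
def Pre_check_laden_ballast_change (vessel_history : List (List (String × String))) (new_laden_ballast : String) (new_report_type : String) : Prop :=
  vessel_history = [] ∨
  ((((PySem.List.pyGet? vessel_history (-1)).getD []).lookup "Laden_Ballst").isSome = true ∧
   (((PySem.List.pyGet? vessel_history (-1)).getD []).lookup "Report_Type").isSome = true ∧
   ((((PySem.List.pyGet? vessel_history (-1)).getD []).lookup "Laden_Ballst").getD "" = new_laden_ballast ∨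
    ∀ i < vessel_history.length, (vessel_history.getD i []).lookup "Report_Type" = none →
      ∃ j < vessel_history.length, i < j ∧
        (((vessel_history.getD j []).lookup "Report_Type").getD "" = "Arrival At Berth" ∨
         ((vessel_history.getD j []).lookup "Report_Type").getD "" = "Departure From Berth" ∨
         ((vessel_history.getD j []).lookup "Report_Type").getD "" = "Departure")))

instance (vessel_history : List (List (String × String))) (new_laden_ballast : String) (new_report_type : String) : Decidable (Pre_check_laden_ballast_change vessel_history new_laden_ballast new_report_type) := by unfold Pre_check_laden_ballast_change; infer_instance

def pvWitness_check_laden_ballast_change : (List (List (String × String))) × String × String :=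
  ([[("Report_Type", "Arrival At Berth"), ("Laden_Ballst", "Laden")]], "Ballast", "Noon")

def Spec_check_laden_ballast_change (vessel_history : List (List (String × String))) (new_laden_ballast : String) (new_report_type : String) (out : Bool × Option String) : Prop := out = check_laden_ballast_change_alt vessel_history new_laden_ballast new_report_type
instance (vessel_history : List (List (String × String))) (new_laden_ballast : String) (new_report_type : String) (out : Bool × Option String) : Decidable (Spec_check_laden_ballast_change vessel_history new_laden_ballast new_report_type out) := by unfold Spec_check_laden_ballast_change; infer_instance

-- ===== CLAIM (what is proved, stated in full; the proofs are below) =====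
def Claim_equal_check_laden_ballast_change : Prop := ∀ (vessel_history : List (List (String × String))) (new_laden_ballast : String) (new_report_type : String), Dom_check_laden_ballast_change vessel_history new_laden_ballast new_report_type → Pre_check_laden_ballast_change vessel_history new_laden_ballast new_report_type → Spec_check_laden_ballast_change vessel_history new_laden_ballast new_report_type (check_laden_ballast_change vessel_history new_laden_ballast new_report_type)

-- ===== LEMMAS AND PROOFS =====
def pvOptLt : Option Int → Int → Prop
  | none, _ => True
  | some a, i => a < i

lemma pvMain (l : List (List (String × String))) :
    pvOptLt (l.foldl pvBStep (0, none, none)).2.1 (l.foldl pvBStep (0, none, none)).1 ∧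
    pvOptLt (l.foldl pvBStep (0, none, none)).2.2 (l.foldl pvBStep (0, none, none)).1 ∧
    pvALoop l.reverse = pvBAllowed (l.foldl pvBStep (0, none, none)).2.1 (l.foldl pvBStep (0, none, none)).2.2 := by
  induction l using List.reverseRecOn with
  | nil => exact ⟨trivial, trivial, rfl⟩
  | append_singleton l x ih =>
    obtain ⟨hla, hld, heq⟩ := ih
    rw [List.foldl_append]
    set st := l.foldl pvBStep (0, none, none) with hst
    simp only [List.foldl_cons, List.foldl_nil, List.reverse_append, List.reverse_singleton,
      List.singleton_append, pvALoop, pvBStep]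
    split_ifs with h1 h2
    · refine ⟨by simp [pvOptLt], ?_, ?_⟩
      · cases hh : st.2.2 <;> simp_all [pvOptLt] <;> omega
      · cases hh : st.2.2 <;> simp [pvBAllowed] <;> rw [hh] at hld <;> simp [pvOptLt] at hld <;> omega
    · refine ⟨?_, by simp [pvOptLt], ?_⟩
      · cases hh : st.2.1 <;> simp_all [pvOptLt] <;> omega
      · cases hh : st.2.1 <;> simp [pvBAllowed] <;> rw [hh] at hla <;> simp [pvOptLt] at hla <;> omega
    · refine ⟨?_, ?_, heq⟩
      · cases hh : st.2.1 <;> simp_all [pvOptLt] <;> omega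
      · cases hh : st.2.2 <;> simp_all [pvOptLt] <;> omega

-- ===== VERDICT (by name: the statement is the Claim_ definition above) =====
theorem check_laden_ballast_change_spec : Claim_equal_check_laden_ballast_change := by
  intro vh nlb nrt _ _
  unfold Spec_check_laden_ballast_change check_laden_ballast_change check_laden_ballast_change_alt
  cases vh with
  | nil => simp
  | cons h t =>
    have hm := (pvMain (h :: t)).2.2
    simp only [pvGetS]
    rw [if_neg (show ¬ (h :: t).length < 1 by simp)]
    by_cases hs : (List.lookup "Laden_Ballst" ((PySem.List.pyGet? (h :: t) (-1)).getD [])).getD "" = nlb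
    · rw [if_neg (not_not_intro hs), if_pos hs]; simp
    · rw [if_pos hs, if_neg hs, hm]
      cases pvBAllowed (List.foldl pvBStep (0, none, none) (h :: t)).2.1
        (List.foldl pvBStep (0, none, none) (h :: t)).2.2 <;> simp
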